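-- pv_equiv track=rewrite | github.com/ChatMED/GeneScout | data_extractor_mcp_server.py | parse_annotate_text_output
-- ===== SOURCE A (Python) =====
-- from typing import Any, Dict, List
--
-- def parse_annotate_text_output(result: Any) -> Dict[str, List[str]]:
--     text = result if isinstance(result, str) else str(result)
--     lines = text.strip().splitlines() if text.strip() else []
--     hpo_ids: List[str] = []
--     hpo_names: List[str] = []
--     for line in lines:
--         parts = line.split("\t")
--         if len(parts) < 5:
--             parts = line.split()
--         if len(parts) >= 4:
--             name = parts[2].strip()
--             hpo = parts[3].strip()
--             if hpo.startswith("HP:"):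
--                 hpo_ids.append(hpo)
--                 hpo_names.append(name)
--     seen = set()
--     out_ids, out_names = [], []
--     for hid, nm in zip(hpo_ids, hpo_names):
--         if hid in seen:
--             continue
--         seen.add(hid)
--         out_ids.append(hid)
--         out_names.append(nm)
--     return {"hpo_ids": out_ids, "hpo_names": out_names}
-- ===== SOURCE B (Python) =====
-- def parse_annotate_text_output(result):
--     text = result if isinstance(result, str) else str(result)
--     seen = set()
--     out_ids, out_names = [], []
--     for line in text.strip().splitlines():
--         parts = line.split("\t")
--         if len(parts) < 5:
--             parts = line.split()
--         if len(parts) >= 4: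
--             hpo = parts[3].strip()
--             if hpo.startswith("HP:") and hpo not in seen:
--                 seen.add(hpo)
--                 out_ids.append(hpo)
--                 out_names.append(parts[2].strip())
--     return {"hpo_ids": out_ids, "hpo_names": out_names}
-- ===== Notes on version B (the rewrite author's own statement) =====
-- stated objective: simpler
-- what changed: B fuses A's two passes (collect parallel id/name lists, then a separate zip-and-dedup loop) into a single pass that checks a seen set per line and never builds the intermediate lists.
import Mathlib
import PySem

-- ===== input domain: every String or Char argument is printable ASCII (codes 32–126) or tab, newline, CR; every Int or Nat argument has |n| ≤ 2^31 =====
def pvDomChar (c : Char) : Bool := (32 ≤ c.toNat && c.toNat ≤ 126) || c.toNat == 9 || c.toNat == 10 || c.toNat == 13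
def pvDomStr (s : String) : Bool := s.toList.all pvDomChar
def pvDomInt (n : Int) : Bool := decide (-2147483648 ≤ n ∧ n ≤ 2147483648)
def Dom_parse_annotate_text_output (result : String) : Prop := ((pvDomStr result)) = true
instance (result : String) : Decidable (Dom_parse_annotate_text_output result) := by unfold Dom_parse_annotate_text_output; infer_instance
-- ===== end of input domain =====

-- B fuses A's two sequential passes into a single pass with a seen set (objective: simpler); same return value.


-- ===== PORT A =====
-- the shared per-line field logic of both Pythons: split on tab, whitespace fallback, stripped fields
def pvParts (line : String) : List String :=
  let parts := (PySem.Str.split? line "\t").getD []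
  if parts.length < 5 then PySem.Str.split₀ line else parts

def pvName (line : String) : String := PySem.Str.strip ((PySem.List.pyGet? (pvParts line) 2).getD "")

def pvHpo (line : String) : String := PySem.Str.strip ((PySem.List.pyGet? (pvParts line) 3).getD "")

-- phase-1 step: collect (hpo_ids, hpo_names) in parallel
def paCollect (st : List String × List String) (line : String) : List String × List String :=
  if 4 ≤ (pvParts line).length then
    if PySem.Str.startswith (pvHpo line) "HP:" then (st.1 ++ [pvHpo line], st.2 ++ [pvName line]) else st
  else st

-- phase-2 step: dedup by id over the zipped pairs
def paDedup (st : PySem.Set String × List String × List String) (p : String × String) :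
    PySem.Set String × List String × List String :=
  if PySem.Set.contains st.1 p.1 then st
  else (PySem.Set.add st.1 p.1, st.2.1 ++ [p.1], st.2.2 ++ [p.2])

def parse_annotate_text_output (result : String) : List (String × List String) :=
  let text := result
  let lines := if PySem.Str.strip text ≠ "" then PySem.Str.splitlines (PySem.Str.strip text) else []
  let idsNames := lines.foldl paCollect ([], [])
  let fin := (idsNames.1.zip idsNames.2).foldl paDedup (PySem.Set.empty, [], [])
  [("hpo_ids", fin.2.1), ("hpo_names", fin.2.2)]

-- ===== PORT B =====
-- single fused step: parse the line and, if it yields a fresh HP: id, emit it at once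
def pbStep (st : PySem.Set String × List String × List String) (line : String) :
    PySem.Set String × List String × List String :=
  if 4 ≤ (pvParts line).length then
    if PySem.Str.startswith (pvHpo line) "HP:" && !(PySem.Set.contains st.1 (pvHpo line)) then
      (PySem.Set.add st.1 (pvHpo line), st.2.1 ++ [pvHpo line], st.2.2 ++ [pvName line])
    else st
  else st

def parse_annotate_text_output_alt (result : String) : List (String × List String) :=
  let fin := (PySem.Str.splitlines (PySem.Str.strip result)).foldl pbStep (PySem.Set.empty, [], [])
  [("hpo_ids", fin.2.1), ("hpo_names", fin.2.2)]

-- ===== PRECONDITION & SPEC =====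
def Spec_parse_annotate_text_output (result : String) (out : List (String × List String)) : Prop := out = parse_annotate_text_output_alt result
instance (result : String) (out : List (String × List String)) : Decidable (Spec_parse_annotate_text_output result out) := by unfold Spec_parse_annotate_text_output; infer_instance

-- ===== CLAIM (what is proved, stated in full; the proofs are below) =====
def Claim_equal_parse_annotate_text_output : Prop := ∀ (result : String), Dom_parse_annotate_text_output result → Spec_parse_annotate_text_output result (parse_annotate_text_output result)

-- ===== LEMMAS AND PROOFS =====
-- per-line extraction, shared characterisation of both ports' field logic
def extractLine (line : String) : Option (String × String) :=
  if 4 ≤ (pvParts line).length then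
    if PySem.Str.startswith (pvHpo line) "HP:" then some (pvHpo line, pvName line) else none
  else none

theorem paCollect_eq (st : List String × List String) (line : String) :
    paCollect st line = match extractLine line with
      | none => st
      | some (h, n) => (st.1 ++ [h], st.2 ++ [n]) := by
  unfold paCollect extractLine
  split_ifs <;> rfl

theorem pbStep_eq (st : PySem.Set String × List String × List String) (line : String) :
    pbStep st line = match extractLine line with
      | none => st
      | some p => paDedup st p := by
  unfold pbStep extractLine paDedup
  split_ifs <;> simp_all

theorem collect_spec (lines : List String) (ids names : List String) :
    lines.foldl paCollect (ids, names) =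
      (ids ++ (lines.filterMap extractLine).map Prod.fst,
       names ++ (lines.filterMap extractLine).map Prod.snd) := by
  induction lines generalizing ids names with
  | nil => simp
  | cons l ls ih =>
    simp only [List.foldl_cons, List.filterMap_cons, paCollect_eq]
    cases h : extractLine l with
    | none => simp [ih]
    | some p => cases p; simp [ih]

theorem fused_eq (lines : List String) (st : PySem.Set String × List String × List String) :
    lines.foldl pbStep st = (lines.filterMap extractLine).foldl paDedup st := by
  induction lines generalizing st with
  | nil => rfl
  | cons l ls ih =>
    simp only [List.foldl_cons, List.filterMap_cons, pbStep_eq]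
    cases h : extractLine l <;> simp [ih]

theorem splitlines_empty : PySem.Str.splitlines "" = [] := by decide

-- ===== VERDICT (by name: the statement is the Claim_ definition above) =====
theorem parse_annotate_text_output_spec : Claim_equal_parse_annotate_text_output := by
  intro result _
  unfold Spec_parse_annotate_text_output parse_annotate_text_output parse_annotate_text_output_alt
  by_cases h : PySem.Str.strip result = ""
  · simp [h, splitlines_empty]
  · simp only [h, ne_eq, not_false_eq_true, if_pos]
    rw [collect_spec, fused_eq]
    simp [List.zip_map']
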